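-- pv_equiv track=rewrite | github.com/divyesh27/temp | PythonPractice/src/FindCharMatchToGivenStringJewelStone.py | find_most_occur_char_from_string
-- ===== SOURCE A (Python) =====
-- from typing import Set
--
-- def find_most_occur_char_from_string(input_string: str, compare: str) -> int:
--     # Input validation
--     if not input_string or not compare:
--         raise ValueError("Pass valid input: Both input_string and compare must be non-empty strings.")
--
--     count = 0
--     distinct_char: Set[str] = set(compare)
--
--     for c in input_string:
--         if c in distinct_char:
--             count += 1
--
--     return count
-- ===== SOURCE B (Python) =====
-- def find_most_occur_char_from_string(input_string: str, compare: str) -> int: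
--     # Input validation
--     if not input_string or not compare:
--         raise ValueError("Pass valid input: Both input_string and compare must be non-empty strings.")
--
--     counts = {}
--     for ch in input_string:
--         counts[ch] = counts.get(ch, 0) + 1
--
--     total = 0
--     for c in set(compare):
--         total += counts.get(c, 0)
--     return total
-- ===== Notes on version B (the rewrite author's own statement) =====
-- stated objective: alternative
-- what changed: B inverts the traversal: instead of scanning input_string with membership tests against set(compare), it builds a per-character frequency dict of input_string in one pass and then sums the counts of compare's distinct characters.
import Mathlib
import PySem

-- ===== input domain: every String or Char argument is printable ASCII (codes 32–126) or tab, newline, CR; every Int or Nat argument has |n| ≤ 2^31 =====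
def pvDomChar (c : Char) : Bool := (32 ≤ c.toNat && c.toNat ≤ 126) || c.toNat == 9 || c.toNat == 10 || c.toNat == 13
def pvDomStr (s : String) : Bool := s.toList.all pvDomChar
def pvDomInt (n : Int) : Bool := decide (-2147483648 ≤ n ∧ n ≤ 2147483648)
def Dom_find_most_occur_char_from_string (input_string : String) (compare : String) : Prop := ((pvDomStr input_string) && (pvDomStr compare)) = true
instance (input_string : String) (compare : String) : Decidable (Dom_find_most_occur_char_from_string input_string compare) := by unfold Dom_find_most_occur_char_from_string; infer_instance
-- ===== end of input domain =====

-- B inverts the traversal: it builds a per-character frequency dict of input_string once, then sums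
-- the counts of compare's distinct characters (objective: alternative decomposition, same cost).

-- ===== PORT A =====
-- scan input_string, testing each char for membership in set(compare)
def find_most_occur_char_from_string (input_string : String) (compare : String) : Int :=
  let distinct_char : PySem.Set Char := PySem.Set.ofList compare.toList
  input_string.toList.foldl
    (fun count c => if PySem.Set.contains distinct_char c then count + 1 else count) 0

-- ===== PORT B =====
-- build a frequency dict of input_string, then sum counts over compare's distinct chars
def find_most_occur_char_from_string_alt (input_string : String) (compare : String) : Int :=
  let counts : PySem.Dict Char Int :=
    input_string.toList.foldl (fun d ch => d.insert ch (d.getD ch 0 + 1)) PySem.Dict.empty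
  (PySem.Set.ofList compare.toList).foldl (fun total c => total + counts.getD c 0) 0

-- ===== PRECONDITION & SPEC =====
-- A raises ValueError iff either string is empty; Pre_ excludes exactly those inputs.
def Pre_find_most_occur_char_from_string (input_string : String) (compare : String) : Prop :=
  input_string ≠ "" ∧ compare ≠ ""
instance (input_string : String) (compare : String) : Decidable (Pre_find_most_occur_char_from_string input_string compare) := by unfold Pre_find_most_occur_char_from_string; infer_instance
def pvWitness_find_most_occur_char_from_string : String × String := ("abca", "ba")

def Spec_find_most_occur_char_from_string (input_string : String) (compare : String) (out : Int) : Prop := out = find_most_occur_char_from_string_alt input_string compare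
instance (input_string : String) (compare : String) (out : Int) : Decidable (Spec_find_most_occur_char_from_string input_string compare out) := by unfold Spec_find_most_occur_char_from_string; infer_instance

-- ===== CLAIM (what is proved, stated in full; the proofs are below) =====
def Claim_equal_find_most_occur_char_from_string : Prop := ∀ (input_string : String) (compare : String), Dom_find_most_occur_char_from_string input_string compare → Pre_find_most_occur_char_from_string input_string compare → Spec_find_most_occur_char_from_string input_string compare (find_most_occur_char_from_string input_string compare)

-- ===== LEMMAS AND PROOFS =====

-- countP of a disjunction splits when the disjuncts are disjoint on the list
theorem countP_mem_cons_of_not_mem {l D : List Char} {c : Char} (hc : c ∉ D) :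
    l.countP (fun x => decide (x ∈ c :: D)) = l.count c + l.countP (fun x => decide (x ∈ D)) := by
  induction l with
  | nil => simp
  | cons x l ih =>
    simp only [List.countP_cons, List.count_cons, ih]
    by_cases hx : x = c
    · subst hx
      simp [hc]
      omega
    · simp [hx, List.mem_cons]
      omega

-- summing per-char counts over a duplicate-free list = one countP over membership
theorem sum_counts_eq_countP (l : List Char) (D : List Char) (hD : D.Nodup) :
    D.foldl (fun total c => total + (l.count c : Int)) 0
      = (l.countP (fun x => decide (x ∈ D)) : Int) := by
  rw [PySem.List.foldl_add]
  induction D with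
  | nil => simp
  | cons c D ih =>
    rcases List.nodup_cons.mp hD with ⟨hc, hD'⟩
    simp only [List.map_cons, List.sum_cons, countP_mem_cons_of_not_mem hc]
    have h := ih hD'
    push_cast at h ⊢
    omega

-- ===== VERDICT (by name: the statement is the Claim_ definition above) =====
theorem find_most_occur_char_from_string_spec : Claim_equal_find_most_occur_char_from_string := by
  intro s t _ _
  unfold Spec_find_most_occur_char_from_string
  unfold find_most_occur_char_from_string find_most_occur_char_from_string_alt
  rw [PySem.List.foldl_if_add_one]
  show 0 + ((s.toList.countP (PySem.Set.ofList t.toList).contains : Nat) : Int)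
      = (PySem.Set.ofList t.toList).foldl
          (fun total c => total +
            (s.toList.foldl (fun d ch => d.insert ch (d.getD ch 0 + 1)) PySem.Dict.empty).getD c 0) 0
  rw [PySem.List.foldl_congr_mem'
    (l := PySem.Set.ofList t.toList) (init := (0 : Int))
    (f := fun total c => total +
      (s.toList.foldl (fun d ch => d.insert ch (d.getD ch 0 + 1))
        (PySem.Dict.empty : PySem.Dict Char Int)).getD c 0)
    (g := fun total c => total + (s.toList.count c : Int))
    (by
      intro c _ acc
      dsimp only
      rw [PySem.Dict.getD_foldl_insert_add_one]
      simp)]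
  rw [sum_counts_eq_countP s.toList (PySem.Set.ofList t.toList) (PySem.Set.nodup_ofList t.toList)]
  simp only [zero_add]
  congr 2
  funext x
  simp [PySem.Set.mem_ofList]
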